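-- pv_equiv track=rewrite | github.com/Dmt-155lbs/Teor-a-de-Testores | Proyecto.py | mayores_filas_sort
-- ===== SOURCE A (Python) =====
-- from typing import List
--
-- def mayores_filas_sort(matriz: List[List[int]]) -> List[List[int]]:
--     matriz_a_ordenar = [fila[:] for fila in matriz]
--
--     def contar_unos(fila):
--         return fila.count(1)
--
--     def comparador_por_unos(a):
--         return contar_unos(a)
--
--     matriz_a_ordenar.sort(key=comparador_por_unos, reverse=True)
--     return matriz_a_ordenar
-- ===== SOURCE B (Python) =====
-- from typing import List
--
-- def mayores_filas_sort(matriz: List[List[int]]) -> List[List[int]]: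
--     # Counting-sort style: emit rows bucketed by their ones-count, highest count first,
--     # keeping input order inside each count (matches the stable reverse sort).
--     if not matriz:
--         return []
--     tope = max(fila.count(1) for fila in matriz)
--     resultado = []
--     for c in range(tope, -1, -1):
--         resultado.extend(fila[:] for fila in matriz if fila.count(1) == c)
--     return resultado
-- ===== Notes on version B (the rewrite author's own statement) =====
-- stated objective: alternative
-- what changed: Replaces the stable comparison sort by a distribution (counting-sort style) pass: compute the maximum ones-count, then for each count from the maximum down to 0 emit the rows with that count in input order.
import Mathlib
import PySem

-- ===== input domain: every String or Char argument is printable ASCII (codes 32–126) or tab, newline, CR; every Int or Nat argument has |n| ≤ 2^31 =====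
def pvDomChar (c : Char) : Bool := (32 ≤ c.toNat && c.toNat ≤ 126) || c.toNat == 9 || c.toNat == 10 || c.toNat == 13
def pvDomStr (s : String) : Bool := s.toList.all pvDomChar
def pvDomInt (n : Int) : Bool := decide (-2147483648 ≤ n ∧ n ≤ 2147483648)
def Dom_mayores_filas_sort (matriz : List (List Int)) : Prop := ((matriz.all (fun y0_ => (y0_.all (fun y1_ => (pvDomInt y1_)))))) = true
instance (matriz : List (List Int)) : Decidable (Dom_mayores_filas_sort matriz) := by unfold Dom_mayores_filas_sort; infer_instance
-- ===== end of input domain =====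

-- B replaces A's stable comparison sort by a counting-sort style distribution over ones-counts (alternative algorithm, same results).

-- ===== PORT A =====
-- A copies each row, then stable-sorts by fila.count(1) descending.
def mayores_filas_sort (matriz : List (List Int)) : List (List Int) :=
  let matriz_a_ordenar := matriz.map (fun fila => fila)  -- fila[:] copy (identity on immutable lists)
  PySem.List.sorted matriz_a_ordenar (fun a => ((PySem.List.count a 1 : Nat) : Int)) true

-- ===== PORT B =====
-- B: max ones-count, then for c from tope down to 0 append the rows whose count is c, in input order.
def mayores_filas_sort_alt (matriz : List (List Int)) : List (List Int) :=
  if matriz = [] then []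
  else
    -- max(...) over a nonempty list; the .getD 0 default is unreachable
    let tope : Int :=
      (PySem.List.max? (matriz.map (fun fila => ((PySem.List.count fila 1 : Nat) : Int))) (fun x => x)).getD 0
    (PySem.List.pyRange tope (-1) (-1)).foldl
      (fun resultado c =>
        resultado ++ (matriz.filter (fun fila => ((PySem.List.count fila 1 : Nat) : Int) == c)).map (fun fila => fila))
      []

-- ===== PRECONDITION & SPEC =====
def Spec_mayores_filas_sort (matriz : List (List Int)) (out : List (List Int)) : Prop := out = mayores_filas_sort_alt matriz
instance (matriz : List (List Int)) (out : List (List Int)) : Decidable (Spec_mayores_filas_sort matriz out) := by unfold Spec_mayores_filas_sort; infer_instance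

-- ===== CLAIM (what is proved, stated in full; the proofs are below) =====
def Claim_equal_mayores_filas_sort : Prop := ∀ (matriz : List (List Int)), Dom_mayores_filas_sort matriz → Spec_mayores_filas_sort matriz (mayores_filas_sort matriz)

-- ===== LEMMAS AND PROOFS =====

theorem insertBy_cons {α : Type} (before : α → α → Bool) (x y : α) (ys : List α) :
    PySem.List.insertBy before x (y :: ys) =
      if before x y then x :: y :: ys else y :: PySem.List.insertBy before x ys := rfl

theorem insertBy_append_not {α : Type} (before : α → α → Bool) (x : α) (b rest : List α)
    (h : ∀ y ∈ b, before x y = false) :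
    PySem.List.insertBy before x (b ++ rest) = b ++ PySem.List.insertBy before x rest := by
  induction b with
  | nil => simp
  | cons y ys ih =>
      rw [List.cons_append, insertBy_cons, h y (by simp)]
      simp only [Bool.false_eq_true, if_false]
      rw [ih (fun z hz => h z (by simp [hz]))]
      simp

theorem insertBy_front {α : Type} (before : α → α → Bool) (x : α) (rest : List α)
    (h : ∀ y ∈ rest, before x y = true) :
    PySem.List.insertBy before x rest = x :: rest := by
  cases rest with
  | nil => rfl
  | cons y ys => simp [insertBy_cons, h y (by simp)]

theorem insert_into_buckets {α : Type} (key : α → Int) (x : α) (xs : List α) :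
    ∀ (cs : List Int), cs.Pairwise (· > ·) → key x ∈ cs →
    PySem.List.insertBy (fun a b => decide (key b < key a)) x
        (cs.flatMap (fun c => xs.filter (fun z => key z == c))) =
      cs.flatMap (fun c => (xs ++ [x]).filter (fun z => key z == c)) := by
  intro cs
  induction cs with
  | nil => intro _ h; simp at h
  | cons c cs' ih =>
      intro hpw hmem
      have hgt : ∀ c' ∈ cs', c' < c := by
        intro c' hc'; exact (List.pairwise_cons.mp hpw).1 c' hc'
      simp only [List.flatMap_cons]
      by_cases hc : key x = c
      · have hb : ∀ y ∈ xs.filter (fun z => key z == c),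
            (fun a b => decide (key b < key a)) x y = false := by
          intro y hy
          have : key y = c := by
            have := (List.mem_filter.mp hy).2; simpa using this
          simp [this, hc]
        rw [insertBy_append_not _ _ _ _ hb]
        have hr : ∀ y ∈ cs'.flatMap (fun c => xs.filter (fun z => key z == c)),
            (fun a b => decide (key b < key a)) x y = true := by
          intro y hy
          rcases List.mem_flatMap.mp hy with ⟨c', hc', hyf⟩
          have : key y = c' := by
            have := (List.mem_filter.mp hyf).2; simpa using this
          simp only [decide_eq_true_eq, this, hc]
          exact hgt c' hc' 
        rw [insertBy_front _ _ _ hr]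
        have h1 : (xs ++ [x]).filter (fun z => key z == c) =
            xs.filter (fun z => key z == c) ++ [x] := by
          simp [List.filter_append, hc]
        have h2 : cs'.flatMap (fun c => (xs ++ [x]).filter (fun z => key z == c)) =
            cs'.flatMap (fun c => xs.filter (fun z => key z == c)) := by
          apply List.flatMap_congr  -- may not exist; fallback below
          intro c' hc'
          have hne : key x ≠ c' := by
            have := hgt c' hc'; omega
          simp [List.filter_append, hne]
        rw [h1, h2]; simp
      · have hx' : key x ∈ cs' := by
          rcases List.mem_cons.mp hmem with h | h
          · exact absurd h hc
          · exact h
        have hb : ∀ y ∈ xs.filter (fun z => key z == c),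
            (fun a b => decide (key b < key a)) x y = false := by
          intro y hy
          have hky : key y = c := by
            have := (List.mem_filter.mp hy).2; simpa using this
          have : key x < c := hgt _ hx'
          simp [hky]; omega
        rw [insertBy_append_not _ _ _ _ hb]
        rw [ih (List.pairwise_cons.mp hpw).2 hx']
        have h1 : (xs ++ [x]).filter (fun z => key z == c) =
            xs.filter (fun z => key z == c) := by
          have : key x ≠ c := hc
          simp [List.filter_append, this]
        rw [h1]

theorem sortRev_eq_flatMap_buckets {α : Type} (key : α → Int) :
    ∀ (xs : List α) (cs : List Int), cs.Pairwise (· > ·) → (∀ x ∈ xs, key x ∈ cs) →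
    List.foldl (fun acc x => PySem.List.insertBy (fun a b => decide (key b < key a)) x acc) [] xs =
      cs.flatMap (fun c => xs.filter (fun x => key x == c)) := by
  intro xs
  induction xs using List.reverseRecOn with
  | nil => intro cs _ _; simp
  | append_singleton xs x ih =>
      intro cs hpw hmem
      rw [List.foldl_append]
      simp only [List.foldl_cons, List.foldl_nil]
      rw [ih cs hpw (fun y hy => hmem y (by simp [hy]))]
      exact insert_into_buckets key x xs cs hpw (hmem x (by simp))

theorem pyRange_down (m : Int) (hm : 0 ≤ m) :
    PySem.List.pyRange m (-1) (-1) = List.map (fun k : Nat => m + (-1) * (k : Int)) (List.range (m + 1).toNat) := by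
  unfold PySem.List.pyRange
  have h1 : ¬((-1 : Int) = 0) := by norm_num
  have h2 : ¬(0 < (-1 : Int)) := by norm_num
  have h3 : (-1 : Int) < m := by omega
  simp only [if_neg h1, if_neg h2, if_pos h3]
  have : (m - -1 + -(-1) - 1) / -(-1) = m + 1 := by norm_num
  rw [this]

theorem mayores_main (matriz : List (List Int)) :
    mayores_filas_sort matriz = mayores_filas_sort_alt matriz := by
  unfold mayores_filas_sort mayores_filas_sort_alt
  by_cases hnil : matriz = []
  · subst hnil; simp [PySem.List.sorted]
  · simp only [if_neg hnil, List.map_id_fun', id]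
    obtain ⟨m, hm⟩ : ∃ m, PySem.List.max?
        (matriz.map (fun fila => ((PySem.List.count fila 1 : Nat) : Int))) (fun x => x) = some m := by
      cases h : PySem.List.max?
          (matriz.map (fun fila => ((PySem.List.count fila 1 : Nat) : Int))) (fun x => x) with
      | none =>
          exfalso
          have := (PySem.List.max?_eq_none_iff _ _).mp h
          rw [List.map_eq_nil_iff] at this
          exact hnil this
      | some m => exact ⟨m, rfl⟩
    rw [hm]
    simp only [Option.getD_some]
    have hm0 : 0 ≤ m := by
      have := PySem.List.max?_mem hm
      rcases List.mem_map.mp this with ⟨fila, _, hf⟩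
      rw [← hf]; positivity
    have hle : ∀ x ∈ matriz, ((PySem.List.count x 1 : Nat) : Int) ≤ m := by
      intro x hx
      exact PySem.List.max?_isMax hm _
        (List.mem_map_of_mem (f := fun fila => ((PySem.List.count fila 1 : Nat) : Int)) hx)
    rw [PySem.List.sorted_rev_eq_foldl_insertBy]
    rw [PySem.List.foldl_append_eq_flatMap
      (fun c => matriz.filter (fun fila => ((PySem.List.count fila 1 : Nat) : Int) == c))]
    simp only [List.nil_append]
    rw [pyRange_down m hm0]
    apply sortRev_eq_flatMap_buckets (fun fila => ((PySem.List.count fila 1 : Nat) : Int))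
    · rw [List.pairwise_map]
      refine List.Pairwise.imp ?_ List.pairwise_lt_range
      intro a b h
      simp only [gt_iff_lt]
      omega
    · intro x hx
      rw [List.mem_map]
      have h1 : (0:Int) ≤ ((PySem.List.count x 1 : Nat) : Int) := by positivity
      have h2 := hle x hx
      refine ⟨(m - ((PySem.List.count x 1 : Nat) : Int)).toNat, ?_, ?_⟩
      · rw [List.mem_range]; omega
      · omega

-- ===== VERDICT (by name: the statement is the Claim_ definition above) =====
theorem mayores_filas_sort_spec : Claim_equal_mayores_filas_sort := by
  intro matriz _
  unfold Spec_mayores_filas_sort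
  exact mayores_main matriz
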